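-- pv_equiv track=rewrite | github.com/QwavePune/aws-infra-agent-bot | core/capabilities.py | _dedupe_tools
-- ===== SOURCE A (Python) =====
-- from typing import Any, Dict, List, Optional
--
-- def _dedupe_tools(tools: List[Dict[str, Any]]) -> List[Dict[str, Any]]:
--     deduped: Dict[str, Dict[str, Any]] = {}
--     for tool in tools:
--         name = (tool.get("name") or "").strip()
--         if not name:
--             continue
--         existing = deduped.get(name)
--         if not existing:
--             deduped[name] = tool
--             continue
--         if len(str(tool.get("description", ""))) > len(str(existing.get("description", ""))):
--             deduped[name] = tool
--     return [deduped[k] for k in sorted(deduped.keys())]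
-- ===== SOURCE B (Python) =====
-- from typing import Any, Dict, List, Optional
--
-- def _dedupe_tools(tools: List[Dict[str, Any]]) -> List[Dict[str, Any]]:
--     names = sorted({(t.get("name") or "").strip() for t in tools} - {""})
--     return [
--         max((t for t in tools if (t.get("name") or "").strip() == n),
--             key=lambda t: len(str(t.get("description", ""))))
--         for n in names
--     ]
-- ===== Notes on version B (the rewrite author's own statement) =====
-- stated objective: simpler
-- what changed: Replaces A's incremental dict accumulation (conditional overwrite per tool, then sort keys) with a direct two-liner: build the sorted set of non-empty stripped names, then for each name pick max(..., key=description length) over the tools bearing that name.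
import Mathlib
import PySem

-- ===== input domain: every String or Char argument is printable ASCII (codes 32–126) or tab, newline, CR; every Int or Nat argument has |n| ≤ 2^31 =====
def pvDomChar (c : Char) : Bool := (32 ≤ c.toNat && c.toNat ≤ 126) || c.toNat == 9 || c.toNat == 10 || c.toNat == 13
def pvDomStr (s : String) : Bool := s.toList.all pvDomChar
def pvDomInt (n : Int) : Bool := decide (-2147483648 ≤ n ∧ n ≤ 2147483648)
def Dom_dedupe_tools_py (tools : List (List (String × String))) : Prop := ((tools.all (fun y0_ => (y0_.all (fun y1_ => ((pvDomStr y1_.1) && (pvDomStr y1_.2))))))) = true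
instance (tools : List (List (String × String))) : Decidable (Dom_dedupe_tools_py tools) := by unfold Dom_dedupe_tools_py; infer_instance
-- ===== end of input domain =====

-- B replaces A's dict-accumulator pass with "sorted set of names, then a per-name max scan" — simpler, same results.

-- ===== PORT A =====
-- shared helpers (both Pythons compute these identical subexpressions on a tool dict)
-- (tool.get("name") or "").strip()  — values are strings, so `or ""` only replaces a missing/empty name
def pvName (tool : List (String × String)) : String :=
  PySem.Str.strip ((PySem.Dict.mk tool).getD "name" "")
-- len(str(tool.get("description", "")))  — values are strings, str() is the identity
def pvDlen (tool : List (String × String)) : Int :=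
  PySem.Str.len ((PySem.Dict.mk tool).getD "description" "")

-- loop body of A: skip empty names; insert if absent (or the stored dict is empty/falsy); else overwrite on strictly longer description
def pvAStep (d : PySem.Dict String (List (String × String))) (tool : List (String × String)) :
    PySem.Dict String (List (String × String)) :=
  let name := pvName tool
  if name = "" then d
  else
    match d.get? name with
    | none => d.insert name tool
    | some existing =>
      if existing = [] then d.insert name tool   -- Python's `if not existing` is also true for a stored empty dict
      else if pvDlen tool > pvDlen existing then d.insert name tool
      else d

def dedupe_tools_py (tools : List (List (String × String))) : List (List (String × String)) :=
  let deduped := tools.foldl pvAStep PySem.Dict.empty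
  (PySem.List.sorted deduped.keys (fun k => k)).map (fun k => deduped.getD k [])

-- ===== PORT B =====
def dedupe_tools_py_alt (tools : List (List (String × String))) : List (List (String × String)) :=
  let names := PySem.List.sorted
    ((PySem.Set.ofList (tools.map pvName)).filter (fun n => !(n == ""))) (fun n => n)
  names.map (fun n =>
    PySem.List.maxD (tools.filter (fun t => pvName t == n)) pvDlen [])

-- ===== PRECONDITION & SPEC =====
def Spec_dedupe_tools_py (tools : List (List (String × String))) (out : List (List (String × String))) : Prop := out = dedupe_tools_py_alt tools
instance (tools : List (List (String × String))) (out : List (List (String × String))) : Decidable (Spec_dedupe_tools_py tools out) := by unfold Spec_dedupe_tools_py; infer_instance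

-- ===== CLAIM (what is proved, stated in full; the proofs are below) =====
def Claim_equal_dedupe_tools_py : Prop := ∀ (tools : List (List (String × String))), Dom_dedupe_tools_py tools → Spec_dedupe_tools_py tools (dedupe_tools_py tools)

-- ===== LEMMAS AND PROOFS =====

theorem pvName_nil : pvName [] = "" := by decide

-- A's per-name replacement fold, lifted out of the dict
def pvPick (o : Option (List (String × String))) (ts : List (List (String × String))) :
    Option (List (String × String)) :=
  ts.foldl (fun o t =>
    match o with
    | none => some t
    | some b => if b = [] then some t else if pvDlen t > pvDlen b then some t else some b) o

theorem pvAStep_mem_keys (d : PySem.Dict String (List (String × String)))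
    (t : List (String × String)) (n : String) :
    n ∈ (pvAStep d t).keys ↔ (pvName t ≠ "" ∧ n = pvName t) ∨ n ∈ d.keys := by
  unfold pvAStep
  by_cases h : pvName t = ""
  · simp [h]
  · have hins : n ∈ (d.insert (pvName t) t).keys ↔ ((pvName t ≠ "" ∧ n = pvName t) ∨ n ∈ d.keys) := by
      rw [PySem.Dict.mem_keys_insert]
      constructor
      · rintro (rfl | hx)
        · exact Or.inl ⟨h, rfl⟩
        · exact Or.inr hx
      · rintro (⟨_, rfl⟩ | hx)
        · exact Or.inl rfl
        · exact Or.inr hx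
    simp only [h, reduceIte]
    cases hd : d.get? (pvName t) with
    | none => exact hins
    | some ex =>
      have hmem : pvName t ∈ d.keys := by
        by_contra hc
        rw [← PySem.Dict.get?_eq_none_iff_not_mem_keys] at hc
        simp [hc] at hd
      have hkeep : n ∈ d.keys ↔ ((pvName t ≠ "" ∧ n = pvName t) ∨ n ∈ d.keys) := by
        constructor
        · exact Or.inr
        · rintro (⟨_, rfl⟩ | hx)
          · exact hmem
          · exact hx
      by_cases he : ex = [] <;> by_cases hg : pvDlen t > pvDlen ex <;>
        simp only [he, hg, if_true, if_false] <;>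
        first | exact hins | exact hkeep

theorem pvAStep_get? (l : List (List (String × String)))
    (d : PySem.Dict String (List (String × String))) (n : String) (hn : n ≠ "") :
    (l.foldl pvAStep d).get? n = pvPick (d.get? n) (l.filter (fun t => pvName t == n)) := by
  induction l generalizing d with
  | nil => simp [pvPick]
  | cons t l ih =>
    rw [List.foldl_cons, ih]
    by_cases ht : pvName t = n
    · have hne : pvName t ≠ "" := ht ▸ hn
      have hstep : (pvAStep d t).get? n =
          (match d.get? n with
           | none => some t
           | some b => if b = [] then some t else if pvDlen t > pvDlen b then some t else some b) := by
        unfold pvAStep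
        simp only [ht, if_neg hn]
        cases hd : d.get? n with
        | none => simp [PySem.Dict.get?_insert_self]
        | some ex =>
          by_cases he : ex = [] <;> by_cases hg : pvDlen t > pvDlen ex <;>
            simp [he, hg, hd, PySem.Dict.get?_insert_self]
      rw [hstep]
      simp only [List.filter_cons, ht, BEq.rfl, if_true]
      cases d.get? n with
      | none => simp [pvPick]
      | some ex => by_cases he : ex = [] <;> by_cases hg : pvDlen t > pvDlen ex <;> simp [pvPick, he, hg]
    · have hstep : (pvAStep d t).get? n = d.get? n := by
        unfold pvAStep
        by_cases h0 : pvName t = ""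
        · simp [h0]
        · simp only [h0]
          cases hd : d.get? (pvName t) with
          | none => exact PySem.Dict.get?_insert_of_ne d t (fun h => ht h.symm)
          | some ex =>
            by_cases he : ex = [] <;> by_cases hg : pvDlen t > pvDlen ex <;>
              simp [he, hg, PySem.Dict.get?_insert_of_ne d _ (fun h => ht h.symm)]
      rw [hstep]
      simp only [List.filter_cons]
      have hbe : (pvName t == n) = false := by simp [ht]
      simp [hbe]

theorem pvKeys_nodup (l : List (List (String × String)))
    (d : PySem.Dict String (List (String × String))) (h : d.keys.Nodup) :
    (l.foldl pvAStep d).keys.Nodup := by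
  induction l generalizing d with
  | nil => exact h
  | cons t l ih =>
    refine ih _ ?_
    unfold pvAStep
    by_cases h0 : pvName t = ""
    · simpa [h0]
    · simp only [h0]
      cases d.get? (pvName t) with
      | none => exact PySem.Dict.nodup_keys_insert d _ _ h
      | some ex =>
        by_cases he : ex = [] <;> by_cases hg : pvDlen t > pvDlen ex <;>
          simp only [he, hg, if_true, if_false] <;>
          first | exact PySem.Dict.nodup_keys_insert d _ _ h | exact h

theorem pvKeys_mem_aux (l : List (List (String × String)))
    (d : PySem.Dict String (List (String × String))) (n : String) :
    n ∈ (l.foldl pvAStep d).keys ↔ (n ≠ "" ∧ n ∈ l.map pvName) ∨ n ∈ d.keys := by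
  induction l generalizing d with
  | nil => simp
  | cons t l ih =>
    rw [List.foldl_cons, ih, pvAStep_mem_keys]
    constructor
    · rintro (⟨hn, hm⟩ | (⟨hne, heq⟩ | hd))
      · exact Or.inl ⟨hn, by simp [hm]⟩
      · exact Or.inl ⟨heq ▸ hne, by simp [heq]⟩
      · exact Or.inr hd
    · rintro (⟨hn, hm⟩ | hd)
      · simp only [List.map_cons, List.mem_cons] at hm
        rcases hm with heq | hm
        · exact Or.inr (Or.inl ⟨heq ▸ hn, heq⟩)
        · exact Or.inl ⟨hn, hm⟩
      · exact Or.inr (Or.inr hd)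

theorem pvPick_eq_max? (ts : List (List (String × String)))
    (o : Option (List (String × String)))
    (ho : ∀ b, o = some b → b ≠ []) (hts : ∀ t ∈ ts, t ≠ []) :
    pvPick o ts = ts.foldl (fun acc t =>
      match acc with
      | none => some t
      | some m => if pvDlen m < pvDlen t then some t else some m) o := by
  induction ts generalizing o with
  | nil => rfl
  | cons t ts ih =>
    unfold pvPick
    rw [List.foldl_cons, List.foldl_cons]
    have ht : t ≠ [] := hts t (by simp)
    cases o with
    | none =>
      exact ih (some t) (by rintro c hc; injection hc with hc; exact hc ▸ ht)
        (fun x hx => hts x (by simp [hx]))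
    | some b =>
      have hb : b ≠ [] := ho b rfl
      simp only [if_neg hb, gt_iff_lt]
      by_cases hg : pvDlen b < pvDlen t
      · simp only [hg, if_true]
        exact ih (some t) (by rintro c hc; injection hc with hc; exact hc ▸ ht)
          (fun x hx => hts x (by simp [hx]))
      · simp only [hg, if_false]
        exact ih (some b) (by rintro c hc; injection hc with hc; exact hc ▸ hb)
          (fun x hx => hts x (by simp [hx]))

-- ===== VERDICT (by name: the statement is the Claim_ definition above) =====
theorem dedupe_tools_py_spec : Claim_equal_dedupe_tools_py := by
  unfold Claim_equal_dedupe_tools_py Spec_dedupe_tools_py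
  intro tools _
  show (PySem.List.sorted (tools.foldl pvAStep PySem.Dict.empty).keys (fun k => k)).map
      (fun k => (tools.foldl pvAStep PySem.Dict.empty).getD k []) =
    (PySem.List.sorted ((PySem.Set.ofList (tools.map pvName)).filter (fun n => !(n == ""))) (fun n => n)).map
      (fun n => PySem.List.maxD (tools.filter (fun t => pvName t == n)) pvDlen [])
  have hkeys : PySem.List.sorted (tools.foldl pvAStep PySem.Dict.empty).keys (fun k => k) =
      PySem.List.sorted ((PySem.Set.ofList (tools.map pvName)).filter (fun n => !(n == ""))) (fun k => k) := by
    apply PySem.List.sorted_eq_sorted_of_perm _ _ _ (fun a b h => h)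
    rw [List.perm_ext_iff_of_nodup (pvKeys_nodup _ _ PySem.Dict.nodup_keys_empty)
      (List.Nodup.filter _ (PySem.Set.nodup_ofList _))]
    intro n
    rw [pvKeys_mem_aux, List.mem_filter, PySem.Set.mem_ofList]
    simp [PySem.Dict.empty, PySem.Dict.keys, and_comm]
  rw [hkeys]
  apply List.map_congr_left
  intro n hn
  have hn' : n ≠ "" := by
    rw [PySem.List.mem_sorted, List.mem_filter] at hn
    simpa using hn.2
  have hgrp : ∀ t ∈ tools.filter (fun t => pvName t == n), t ≠ [] := by
    intro t ht h0
    rw [List.mem_filter] at ht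
    have h2 := ht.2
    rw [h0] at h2
    rw [pvName_nil] at h2
    exact hn' ((beq_iff_eq.mp h2).symm)
  rw [PySem.Dict.getD, pvAStep_get? tools PySem.Dict.empty n hn']
  have h0 : (PySem.Dict.empty : PySem.Dict String (List (String × String))).get? n = none := by
    simp [PySem.Dict.get?, PySem.Dict.empty]
  rw [h0, pvPick_eq_max? _ none (by simp) hgrp]
  unfold PySem.List.maxD PySem.List.max?
  congr 1
  apply List.foldl_ext
  intro b a _
  cases b <;> rfl
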